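-- pv_equiv track=rewrite | github.com/tom-brash/advent-of-code | 2020/day10/10-2.py | parse_diffs
-- ===== SOURCE A (Python) =====
-- def parse_diffs(sequence):
--     groups = []
--     consecutive_ones = 0
--     for diff in sequence:
--         if diff == 1:
--             consecutive_ones += 1
--         if diff == 3:
--             groups.append(consecutive_ones)
--             consecutive_ones = 0
--
--     return groups
-- ===== SOURCE B (Python) =====
-- def parse_diffs(sequence):
--     # Split into segments delimited by 3 (trailing leftover dropped), then count 1s per segment.
--     segments = []
--     current = []
--     for diff in sequence:
--         if diff == 3:
--             segments.append(current)
--             current = []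
--         else:
--             current.append(diff)
--     return [seg.count(1) for seg in segments]
-- ===== Notes on version B (the rewrite author's own statement) =====
-- stated objective: alternative
-- what changed: Replaces the running-counter fold with a split-on-3 segmentation followed by a per-segment count of 1s (two passes instead of one counter).
import Mathlib
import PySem

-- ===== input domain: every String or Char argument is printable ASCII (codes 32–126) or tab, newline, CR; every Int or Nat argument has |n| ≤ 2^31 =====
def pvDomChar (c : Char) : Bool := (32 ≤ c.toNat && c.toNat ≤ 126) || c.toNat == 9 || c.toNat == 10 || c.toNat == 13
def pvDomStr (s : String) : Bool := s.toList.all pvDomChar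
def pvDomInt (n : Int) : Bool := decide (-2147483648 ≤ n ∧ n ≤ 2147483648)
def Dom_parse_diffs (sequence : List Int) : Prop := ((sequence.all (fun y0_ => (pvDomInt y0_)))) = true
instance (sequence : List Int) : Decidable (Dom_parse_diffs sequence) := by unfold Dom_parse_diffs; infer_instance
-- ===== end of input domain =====

-- B replaces A's running counter with a split-on-3 segmentation then per-segment count of 1s (alternative decomposition, same cost).


-- ===== PORT A =====
def parse_diffs (sequence : List Int) : List Int :=
  (sequence.foldl (fun (st : List Int × Int) diff =>
      let st := if diff == 1 then (st.1, st.2 + 1) else st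
      if diff == 3 then (st.1 ++ [st.2], 0) else st)
    ([], 0)).1

-- ===== PORT B =====
def parse_diffs_alt (sequence : List Int) : List Int :=
  ((sequence.foldl (fun (st : List (List Int) × List Int) diff =>
      if diff == 3 then (st.1 ++ [st.2], []) else (st.1, st.2 ++ [diff]))
    ([], [])).1).map (fun seg => (PySem.List.count seg 1 : Int))

-- ===== PRECONDITION & SPEC =====
def Spec_parse_diffs (sequence : List Int) (out : List Int) : Prop := out = parse_diffs_alt sequence
instance (sequence : List Int) (out : List Int) : Decidable (Spec_parse_diffs sequence out) := by unfold Spec_parse_diffs; infer_instance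

-- ===== CLAIM (what is proved, stated in full; the proofs are below) =====
def Claim_equal_parse_diffs : Prop := ∀ (sequence : List Int), Dom_parse_diffs sequence → Spec_parse_diffs sequence (parse_diffs sequence)

-- ===== LEMMAS AND PROOFS =====

-- Invariant linking the two folds: A's accumulator is B's accumulator viewed through count-of-1s.
theorem parse_diffs_fold_inv (sequence : List Int) (segs : List (List Int)) (cur : List Int) :
    (sequence.foldl (fun (st : List Int × Int) diff =>
        let st := if diff == 1 then (st.1, st.2 + 1) else st
        if diff == 3 then (st.1 ++ [st.2], 0) else st)
      (segs.map (fun seg => (PySem.List.count seg 1 : Int)), ((PySem.List.count cur 1 : Nat) : Int))).1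
    = ((sequence.foldl (fun (st : List (List Int) × List Int) diff =>
        if diff == 3 then (st.1 ++ [st.2], []) else (st.1, st.2 ++ [diff]))
      (segs, cur)).1).map (fun seg => (PySem.List.count seg 1 : Int)) := by
  induction sequence generalizing segs cur with
  | nil => rfl
  | cons d rest ih =>
    simp only [List.foldl_cons]
    by_cases h3 : d = 3
    · subst h3
      have := ih (segs ++ [cur]) []
      simp only [beq_iff_eq] at *
      simpa [PySem.List.count] using this
    · by_cases h1 : d = 1
      · subst h1
        have := ih segs (cur ++ [(1 : Int)])
        simp only [beq_iff_eq] at *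
        simpa [PySem.List.count, List.count_append] using this
      · have := ih segs (cur ++ [d])
        simp only [beq_iff_eq] at *
        simpa [h3, h1, PySem.List.count, List.count_append] using this

-- ===== VERDICT (by name: the statement is the Claim_ definition above) =====
theorem parse_diffs_spec : Claim_equal_parse_diffs := by
  intro sequence _
  unfold Spec_parse_diffs parse_diffs parse_diffs_alt
  exact parse_diffs_fold_inv sequence [] []
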